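-- pv_equiv track=rewrite | github.com/wooktori/algorithm | 프로그래머스/python/LV2/리코쳇 로봇.py | solution
-- ===== SOURCE A (Python) =====
-- from collections import deque
--
-- def solution(board):
--     N = len(board)
--     M = len(board[0])
--     board = [list(i) for i in board]
--     dis = [[100 for _ in range(M)] for _ in range(N)]
--     startX = 0
--     startY = 0
--     for i in range(N):
--         for j in range(M):
--             if board[i][j] == "R":
--                 startX = i
--                 startY = j
--                 dis[i][j] = 0
--
--     dx = [1, -1, 0, 0]
--     dy = [0, 0, 1, -1]
--     q = deque([(startX, startY, 0)])
--     while q: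
--         x, y, count = q.popleft()
--         if board[x][y] == "G":
--             return count
--
--         for i in range(4):
--             nx = x
--             ny = y
--             while (
--                 0 <= nx + dx[i] < N
--                 and 0 <= ny + dy[i] < M
--                 and board[nx + dx[i]][ny + dy[i]] != "D"
--             ):
--                 nx += dx[i]
--                 ny += dy[i]
--
--             if dis[nx][ny] > count + 1:
--                 dis[nx][ny] = count + 1
--                 q.append((nx, ny, count + 1))
--     return -1
-- ===== SOURCE B (Python) =====
-- def sweep_bwd(s):
--     # dest[j] = resting index when sliding toward increasing index from j
--     dest = [0] * len(s)
--     for j in range(len(s) - 1, -1, -1):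
--         dest[j] = j if j + 1 == len(s) or s[j + 1] == "D" else dest[j + 1]
--     return dest
--
--
-- def sweep_fwd(s):
--     # dest[j] = resting index when sliding toward decreasing index from j
--     dest = [0] * len(s)
--     for j in range(len(s)):
--         dest[j] = j if j == 0 or s[j - 1] == "D" else dest[j - 1]
--     return dest
--
--
-- def solution(board):
--     N = len(board)
--     M = len(board[0])
--     g = [r[:M] for r in board]
--     cols = [[g[i][j] for i in range(N)] for j in range(M)]
--     br = [sweep_bwd(r) for r in g]     # slide right destinations, per row
--     fr = [sweep_fwd(r) for r in g]     # slide left destinations, per row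
--     bc = [sweep_bwd(c) for c in cols]  # slide down destinations, per column
--     fc = [sweep_fwd(c) for c in cols]  # slide up destinations, per column
--     sx = sy = 0
--     dis = [[100] * M for _ in range(N)]
--     for i in range(N):
--         for j in range(M):
--             if g[i][j] == "R":
--                 sx, sy = i, j
--                 dis[i][j] = 0
--     q = [(sx, sy, 0)]
--     head = 0
--     while head < len(q):
--         x, y, c = q[head]
--         head += 1
--         if g[x][y] == "G":
--             return c
--         for nx, ny in ((bc[y][x], y), (fc[y][x], y), (x, br[x][y]), (x, fr[x][y])):
--             if dis[nx][ny] > c + 1: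
--                 dis[nx][ny] = c + 1
--                 q.append((nx, ny, c + 1))
--     return -1
-- ===== Notes on version B (the rewrite author's own statement) =====
-- stated objective: alternative
-- what changed: B precomputes, with one linear sweep per row and per column, a jump table of slide destinations for all four directions, then runs the BFS over a head-indexed list reading neighbours from the table in O(1), instead of A's deque BFS that re-runs the cell-by-cell while-loop slide at every expansion; it trades A's repeated sliding for table-building work up front.
import Mathlib
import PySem

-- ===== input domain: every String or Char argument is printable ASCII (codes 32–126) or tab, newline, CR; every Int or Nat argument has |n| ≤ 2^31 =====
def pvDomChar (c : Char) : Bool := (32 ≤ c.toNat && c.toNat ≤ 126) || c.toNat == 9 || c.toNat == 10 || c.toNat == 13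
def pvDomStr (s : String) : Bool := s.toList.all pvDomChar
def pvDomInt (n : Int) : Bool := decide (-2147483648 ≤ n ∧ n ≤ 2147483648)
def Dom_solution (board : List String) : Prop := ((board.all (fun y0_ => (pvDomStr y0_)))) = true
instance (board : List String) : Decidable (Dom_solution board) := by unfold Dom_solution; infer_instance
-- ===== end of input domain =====

-- B replaces A's per-move while-loop sliding (re-scanned at every BFS expansion) by jump tables
-- precomputed with one linear sweep per row/column, and a head-indexed list instead of a deque.

-- ===== shared low-level accessors (both Pythons index board/dis identically) =====
-- board[x][y]; the default is never read on inputs admitted by Pre_ (indices are bounds-checked first)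
def pvGetC (g : List (List Char)) (x y : Int) : Char :=
  (PySem.List.pyGet? ((PySem.List.pyGet? g x).getD []) y).getD '#'

-- dis[x][y]
def pvGetI (d : List (List Int)) (x y : Int) : Int :=
  (PySem.List.pyGet? ((PySem.List.pyGet? d x).getD []) y).getD 0

-- dis[x][y] = v   (x, y are in range and nonnegative at every use inside Pre_)
def pvSetI (d : List (List Int)) (x y v : Int) : List (List Int) :=
  d.set x.toNat (((PySem.List.pyGet? d x).getD []).set y.toNat v)

-- the body `if dis[nx][ny] > count + 1: dis[nx][ny] = count + 1; q.append(...)`, identical in A and B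
def pvRelax (c : Int) (st : List (List Int) × List (Int × Int × Int)) (p : Int × Int) :
    List (List Int) × List (Int × Int × Int) :=
  if pvGetI st.1 p.1 p.2 > c + 1 then (pvSetI st.1 p.1 p.2 (c + 1), st.2 ++ [(p.1, p.2, c + 1)])
  else st

-- the `R`-scan (start position and dis initialisation), identical in A and B
def pvInit (g : List (List Char)) (N M : Int) : Int × Int × List (List Int) :=
  (PySem.List.pyRange 0 N 1).foldl
    (fun st i =>
      (PySem.List.pyRange 0 M 1).foldl
        (fun (st : Int × Int × List (List Int)) j =>
          if pvGetC g i j = 'R' then (i, j, pvSetI st.2.2 i j 0) else st)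
        st)
    (0, 0, List.replicate N.toNat (List.replicate M.toNat 100))

-- ===== PORT A =====
-- `for i in range(4)` with dx = [1,-1,0,0], dy = [0,0,1,-1] ported as a fold over the zipped pairs
def pvDirs : List (Int × Int) := [(1, 0), (-1, 0), (0, 1), (0, -1)]

-- the inner `while` slide; fuel (N+M).toNat+1 exceeds the ≤ max(N,M) possible steps
def pvSlide (g : List (List Char)) (N M : Int) (d : Int × Int) : Nat → Int → Int → Int × Int
  | 0, nx, ny => (nx, ny)
  | f + 1, nx, ny =>
    if 0 ≤ nx + d.1 ∧ nx + d.1 < N ∧ 0 ≤ ny + d.2 ∧ ny + d.2 < M ∧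
        pvGetC g (nx + d.1) (ny + d.2) ≠ 'D' then
      pvSlide g N M d f (nx + d.1) (ny + d.2)
    else (nx, ny)

-- the BFS while-loop over a deque; one fuel unit per pop, fuel 100*N*M+1 exceeds the possible
-- number of pops (each enqueue strictly decreases one dis entry, which stays in [1,100])
def pvLoopA (g : List (List Char)) (N M : Int) : Nat → List (Int × Int × Int) → List (List Int) → Int
  | 0, _, _ => -1
  | _ + 1, [], _ => -1
  | f + 1, (x, y, c) :: q, dis =>
    if pvGetC g x y = 'G' then c
    else
      let st := pvDirs.foldl (fun st d => pvRelax c st (pvSlide g N M d ((N + M).toNat + 1) x y)) (dis, q)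
      pvLoopA g N M f st.2 st.1

def solution (board : List String) : Int :=
  let g := board.map (fun s => s.toList)
  let N : Int := g.length
  let M : Int := ((PySem.List.pyGet? g 0).getD []).length
  let init := pvInit g N M
  pvLoopA g N M (100 * (N.toNat * M.toNat) + 1) [(init.1, init.2.1, 0)] init.2.2

-- ===== PORT B =====
-- dest[j] = j if j+1 == len(s) or s[j+1] == 'D' else dest[j+1], filled from the high end:
-- rendered as structural recursion on the suffix (dest[j] depends on dest[j+1])
def pvSweepBwd (j : Int) : List Char → List Int
  | [] => []
  | [_] => [j]
  | _ :: c2 :: rest =>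
    let t := pvSweepBwd (j + 1) (c2 :: rest)
    (if c2 = 'D' then j else t.headI) :: t

-- dest[j] = j if j == 0 or s[j-1] == 'D' else dest[j-1], filled forward carrying (prev dest, prev char)
def pvSweepFwdGo (j prev : Int) (pc : Char) : List Char → List Int
  | [] => []
  | c :: rest =>
    let dcur := if pc = 'D' then j else prev
    dcur :: pvSweepFwdGo (j + 1) dcur c rest

def pvSweepFwd : List Char → List Int
  | [] => []
  | c :: rest => 0 :: pvSweepFwdGo 1 0 c rest

-- `while head < len(q)` BFS over a head-indexed list, neighbours read from the jump tables
def pvLoopB (g : List (List Char)) (bc fc br fr : List (List Int)) :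
    Nat → List (Int × Int × Int) → Nat → List (List Int) → Int
  | 0, _, _, _ => -1
  | f + 1, q, head, dis =>
    match PySem.List.pyGet? q (head : Int) with
    | none => -1
    | some (x, y, c) =>
      if pvGetC g x y = 'G' then c
      else
        let st := [(pvGetI bc y x, y), (pvGetI fc y x, y), (x, pvGetI br x y), (x, pvGetI fr x y)].foldl
          (pvRelax c) (dis, q)
        pvLoopB g bc fc br fr f st.2 (head + 1) st.1

def solution_alt (board : List String) : Int :=
  let rows := board.map (fun s => s.toList)
  let N : Int := rows.length
  let M : Int := ((PySem.List.pyGet? rows 0).getD []).length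
  let g := rows.map (fun r => r.take M.toNat)      -- g = [r[:M] for r in board]
  let cols := (PySem.List.pyRange 0 M 1).map (fun j => (PySem.List.pyRange 0 N 1).map (fun i => pvGetC g i j))
  let br := g.map (pvSweepBwd 0)
  let fr := g.map pvSweepFwd
  let bc := cols.map (pvSweepBwd 0)
  let fc := cols.map pvSweepFwd
  let init := pvInit g N M
  pvLoopB g bc fc br fr (100 * (N.toNat * M.toNat) + 1) [(init.1, init.2.1, 0)] 0 init.2.2

-- ===== PRECONDITION & SPEC =====
-- Pre_ excludes exactly the boards on which A raises IndexError: the empty board, a board whose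
-- first row is empty (the pop reads board[0][0] or board[startX][startY] past a row end), and a
-- board with some row shorter than the first (the R-scan reads board[i][j] for every j < M).
def Pre_solution (board : List String) : Prop :=
  board ≠ [] ∧ 0 < (board.headD "").toList.length ∧
    ∀ s ∈ board, (board.headD "").toList.length ≤ s.toList.length

instance (board : List String) : Decidable (Pre_solution board) := by
  unfold Pre_solution; infer_instance

def pvWitness_solution : List String := ["R.G", "D.D"]

def Spec_solution (board : List String) (out : Int) : Prop := out = solution_alt board
instance (board : List String) (out : Int) : Decidable (Spec_solution board out) := by
  unfold Spec_solution; infer_instance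

-- ===== CLAIM (what is proved, stated in full; the proofs are below) =====
def Claim_equal_solution : Prop :=
  ∀ (board : List String), Dom_solution board → Pre_solution board → Spec_solution board (solution board)

-- ===== LEMMAS AND PROOFS =====

-- abstract 1-D slides used to relate A's while-loop to B's sweep tables
def pvS1 (cs : List Char) (k : Nat) : Nat :=
  if k + 1 < cs.length ∧ cs[k + 1]? ≠ some 'D' then pvS1 cs (k + 1) else k
termination_by cs.length - k

def pvS1' (cs : List Char) (k : Nat) : Nat :=
  if 0 < k ∧ cs[k - 1]? ≠ some 'D' then pvS1' cs (k - 1) else k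
termination_by k

lemma pvS1_lt (cs : List Char) : ∀ (k : Nat), k < cs.length → pvS1 cs k < cs.length := by
  intro k
  induction k using pvS1.induct (cs := cs) with
  | case1 k hc ih =>
    intro _
    rw [pvS1, if_pos hc]
    exact ih hc.1
  | case2 k hc =>
    intro h
    rw [pvS1, if_neg hc]
    exact h

lemma pvS1'_le (cs : List Char) : ∀ (k : Nat), pvS1' cs k ≤ k := by
  intro k
  induction k using pvS1'.induct (cs := cs) with
  | case1 k hc ih =>
    rw [pvS1', if_pos hc]
    omega
  | case2 k hc =>
    rw [pvS1', if_neg hc]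

lemma pvS1_cons (cs : List Char) (c : Char) : ∀ (k : Nat),
    pvS1 (c :: cs) (k + 1) = pvS1 cs k + 1 := by
  intro k
  induction k using pvS1.induct (cs := cs) with
  | case1 k hc ih =>
    have hc' : k + 1 + 1 < (c :: cs).length ∧ (c :: cs)[k + 1 + 1]? ≠ some 'D' := by
      simpa [List.length_cons, Nat.add_lt_add_iff_right] using hc
    conv_lhs => rw [pvS1, if_pos hc']
    conv_rhs => rw [pvS1, if_pos hc]
    exact ih
  | case2 k hc =>
    have hc' : ¬ (k + 1 + 1 < (c :: cs).length ∧ (c :: cs)[k + 1 + 1]? ≠ some 'D') := by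
      simpa [List.length_cons, Nat.add_lt_add_iff_right] using hc
    conv_lhs => rw [pvS1, if_neg hc']
    conv_rhs => rw [pvS1, if_neg hc]

lemma sweepBwd_get : ∀ (j : Int) (cs : List Char) (k : Nat), k < cs.length →
    (pvSweepBwd j cs)[k]? = some (j + (pvS1 cs k : Int)) := by
  intro j cs
  induction j, cs using pvSweepBwd.induct with
  | case1 j => intro k hk; simp at hk
  | case2 j c =>
    intro k hk
    have hk0 : k = 0 := by simpa using Nat.lt_one_iff.mp (by simpa using hk)
    subst hk0
    have h1 : pvS1 [c] 0 = 0 := by rw [pvS1]; simp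
    simp [pvSweepBwd, h1]
  | case3 j c c2 rest ih =>
    intro k hk
    have hlen : 0 < (c2 :: rest).length := by simp
    cases k with
    | zero =>
      by_cases hD : c2 = 'D'
      · subst hD
        have hS0 : pvS1 (c :: 'D' :: rest) 0 = 0 := by rw [pvS1]; simp
        simp [pvSweepBwd, hS0]
      · have hS : pvS1 (c :: c2 :: rest) 0 = pvS1 (c2 :: rest) 0 + 1 := by
          rw [pvS1]
          rw [if_pos ⟨by simp, by simpa using hD⟩]
          simp [pvS1_cons]
        have hhead := ih 0 hlen
        cases hl : pvSweepBwd (j + 1) (c2 :: rest) with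
        | nil => rw [hl] at hhead; simp at hhead
        | cons a t =>
          rw [hl] at hhead
          simp only [List.getElem?_cons_zero] at hhead
          have ha : a = j + 1 + (pvS1 (c2 :: rest) 0 : Int) := Option.some.inj hhead
          simp only [pvSweepBwd, hl, List.getElem?_cons_zero, if_neg hD, List.headI, ha, hS]
          push_cast
          ring_nf
    | succ k =>
      have hk' : k < (c2 :: rest).length := by
        simp only [List.length_cons] at hk ⊢
        omega
      have := ih k hk'
      simp only [pvSweepBwd, List.getElem?_cons_succ, this, pvS1_cons]
      push_cast
      ring_nf

lemma sweepFwdGo_get : ∀ (rest cs : List Char) (j : Nat) (prev : Int) (pc : Char) (k : Nat),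
    rest = cs.drop j → 1 ≤ j → cs[j - 1]? = some pc → prev = (pvS1' cs (j - 1) : Int) →
    k < rest.length →
    (pvSweepFwdGo (j : Int) prev pc rest)[k]? = some ((pvS1' cs (j + k) : Int)) := by
  intro rest
  induction rest with
  | nil => intro cs j prev pc k _ _ _ _ hk; simp at hk
  | cons ch rest' ih =>
    intro cs j prev pc k hdrop hj hgc hprev hk
    have hcj : cs[j]? = some ch := by
      have h0 : (cs.drop j)[0]? = cs[j]? := by simp [List.getElem?_drop]
      rw [← hdrop] at h0
      simpa using h0.symm
    have hval : pvS1' cs j = if pc = 'D' then j else pvS1' cs (j - 1) := by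
      by_cases hD : pc = 'D'
      · rw [pvS1', if_neg (by rw [hgc, hD]; simp), if_pos hD]
      · rw [pvS1', if_pos ⟨by omega, by rw [hgc]; simpa using hD⟩, if_neg hD]
    have hdcur : (if pc = 'D' then (j : Int) else prev) = (pvS1' cs j : Int) := by
      rw [hval]
      split_ifs with hD
      · rfl
      · exact hprev
    cases k with
    | zero =>
      simp only [pvSweepFwdGo, List.getElem?_cons_zero, Nat.add_zero]
      exact congrArg some hdcur
    | succ k =>
      have hrest' : rest' = cs.drop (j + 1) := by
        have : (cs.drop j).tail = cs.drop (j + 1) := by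
          rw [← List.drop_drop]
          simp
        rw [← hdrop] at this
        simpa using this
      have hk' : k < rest'.length := by simpa using hk
      have hcast : (j : Int) + 1 = ((j + 1 : Nat) : Int) := by push_cast; ring
      have := ih cs (j + 1) (if pc = 'D' then (j : Int) else prev) ch k hrest' (by omega)
        (by simpa using hcj) (by simpa using hdcur) hk'
      simp only [pvSweepFwdGo, List.getElem?_cons_succ, hcast]
      rw [show j + (k + 1) = j + 1 + k from by omega]
      exact this

lemma sweepFwd_get (cs : List Char) (k : Nat) (h : k < cs.length) :
    (pvSweepFwd cs)[k]? = some ((pvS1' cs k : Int)) := by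
  match cs, h with
  | c :: rest, h =>
    cases k with
    | zero =>
      have : pvS1' (c :: rest) 0 = 0 := by rw [pvS1']; simp
      simp [pvSweepFwd, this]
    | succ k =>
      have hp : pvS1' (c :: rest) 0 = 0 := by rw [pvS1']; simp
      have := sweepFwdGo_get rest (c :: rest) 1 0 c k (by simp) (by omega) (by simp)
        (by simp [hp]) (by simpa using h)
      simpa [pvSweepFwd, Nat.add_comm] using this

-- row x truncated to M columns, and column j, as B's tables see them
def pvRowB (g : List (List Char)) (M x : Nat) : List Char := ((g[x]?).getD []).take M

def pvColB (g : List (List Char)) (N M : Int) (j : Int) : List Char :=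
  (PySem.List.pyRange 0 N 1).map (fun i => pvGetC (g.map (fun r => r.take M.toNat)) i j)

lemma getC_take (g : List (List Char)) (M x y : Int) (hx0 : 0 ≤ x) (hxN : x < (g.length : Int))
    (hy0 : 0 ≤ y) (hyM : y < M) :
    pvGetC (g.map (fun r => r.take M.toNat)) x y = pvGetC g x y := by
  unfold pvGetC
  rw [PySem.List.pyGet?_of_nonneg _ hx0, PySem.List.pyGet?_of_nonneg _ hx0]
  rw [List.getElem?_map]
  have hxlen : x.toNat < g.length := by omega
  rw [List.getElem?_eq_getElem hxlen]
  simp only [Option.map_some, Option.getD_some]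
  rw [PySem.List.pyGet?_of_nonneg _ hy0, PySem.List.pyGet?_of_nonneg _ hy0]
  have hyM' : y.toNat < M.toNat := by omega
  rw [List.getElem?_take_of_lt hyM']

lemma rowB_len (g : List (List Char)) (M : Int) (x : Nat)
    (Hrow : ∀ r ∈ g, M ≤ (r.length : Int)) (hx : x < g.length) :
    (pvRowB g M.toNat x).length = M.toNat := by
  unfold pvRowB
  rw [List.getElem?_eq_getElem hx]
  simp only [Option.getD_some, List.length_take]
  have := Hrow g[x] (List.getElem_mem hx)
  omega

lemma rowB_get (g : List (List Char)) (M x y : Int) (hx0 : 0 ≤ x) (hxN : x < (g.length : Int))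
    (hy0 : 0 ≤ y) (hyM : y < M) (Hrow : ∀ r ∈ g, M ≤ (r.length : Int)) :
    (pvRowB g M.toNat x.toNat)[y.toNat]? = some (pvGetC g x y) := by
  unfold pvRowB pvGetC
  have hxlen : x.toNat < g.length := by omega
  rw [List.getElem?_eq_getElem hxlen]
  simp only [Option.getD_some]
  have hyM' : y.toNat < M.toNat := by omega
  rw [List.getElem?_take_of_lt hyM']
  rw [PySem.List.pyGet?_of_nonneg _ hx0, List.getElem?_eq_getElem hxlen]
  simp only [Option.getD_some]
  rw [PySem.List.pyGet?_of_nonneg _ hy0]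
  have hylen : y.toNat < (g[x.toNat]).length := by
    have := Hrow g[x.toNat] (List.getElem_mem hxlen)
    omega
  rw [List.getElem?_eq_getElem hylen]
  simp

lemma colB_len (g : List (List Char)) (N M : Int) (j : Int) :
    (pvColB g N M j).length = N.toNat := by
  unfold pvColB
  simp [PySem.List.length_pyRange_one]

lemma colB_get (g : List (List Char)) (N M : Int) (j i : Int) (HgN : N = (g.length : Int))
    (hi0 : 0 ≤ i) (hiN : i < N) (hj0 : 0 ≤ j) (hjM : j < M) :
    (pvColB g N M j)[i.toNat]? = some (pvGetC g i j) := by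
  unfold pvColB
  rw [List.getElem?_map]
  have : (PySem.List.pyRange 0 N 1)[i.toNat]? = some i := by
    rw [PySem.List.getElem?_pyRange_one, if_pos (by omega)]
    simp [Int.toNat_of_nonneg hi0]
  rw [this]
  simp only [Option.map_some]
  rw [getC_take g M i j hi0 (by omega) hj0 hjM]

lemma slide_right (g : List (List Char)) (N M : Int) (HgN : N = (g.length : Int))
    (Hrow : ∀ r ∈ g, M ≤ (r.length : Int)) :
    ∀ (f : Nat) (x y : Int), 0 ≤ x → x < N → 0 ≤ y → y < M → M.toNat - y.toNat ≤ f →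
      pvSlide g N M (0, 1) f x y = (x, (pvS1 (pvRowB g M.toNat x.toNat) y.toNat : Int)) := by
  intro f
  induction f with
  | zero => intro x y hx0 hxN hy0 hyM hf; omega
  | succ f ih =>
    intro x y hx0 hxN hy0 hyM hf
    have hxlen : x.toNat < g.length := by omega
    have hlen : (pvRowB g M.toNat x.toNat).length = M.toNat := rowB_len g M x.toNat Hrow hxlen
    have hunf : pvSlide g N M (0, 1) (f + 1) x y =
        if 0 ≤ x + 0 ∧ x + 0 < N ∧ 0 ≤ y + 1 ∧ y + 1 < M ∧ pvGetC g (x + 0) (y + 1) ≠ 'D' then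
          pvSlide g N M (0, 1) f (x + 0) (y + 1)
        else (x, y) := rfl
    by_cases hstep : y + 1 < M ∧ pvGetC g x (y + 1) ≠ 'D'
    · have hget : (pvRowB g M.toNat x.toNat)[y.toNat + 1]? = some (pvGetC g x (y + 1)) := by
        have := rowB_get g M x (y + 1) hx0 (by omega) (by omega) hstep.1 Hrow
        rwa [show (y + 1).toNat = y.toNat + 1 from by omega] at this
      rw [hunf, if_pos ⟨by omega, by omega, by omega, hstep.1, by simpa using hstep.2⟩]
      rw [show x + (0 : Int) = x from by ring]
      rw [ih x (y + 1) hx0 hxN (by omega) hstep.1 (by omega)]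
      have hS : pvS1 (pvRowB g M.toNat x.toNat) y.toNat =
          pvS1 (pvRowB g M.toNat x.toNat) (y.toNat + 1) := by
        rw [pvS1, if_pos ⟨by omega, by rw [hget]; simpa using hstep.2⟩]
      rw [show (y + 1).toNat = y.toNat + 1 from by omega, hS]
    · rw [hunf, if_neg (by
        intro h
        exact hstep ⟨h.2.2.2.1, by simpa using h.2.2.2.2⟩)]
      have hS : pvS1 (pvRowB g M.toNat x.toNat) y.toNat = y.toNat := by
        rw [pvS1, if_neg]
        intro h
        have hyM1 : y + 1 < M := by omega
        have hget : (pvRowB g M.toNat x.toNat)[y.toNat + 1]? = some (pvGetC g x (y + 1)) := by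
          have := rowB_get g M x (y + 1) hx0 (by omega) (by omega) hyM1 Hrow
          rwa [show (y + 1).toNat = y.toNat + 1 from by omega] at this
        rw [hget] at h
        exact hstep ⟨hyM1, by simpa using h.2⟩
      rw [hS]
      simp [Int.toNat_of_nonneg hy0]

lemma slide_left (g : List (List Char)) (N M : Int) (HgN : N = (g.length : Int))
    (Hrow : ∀ r ∈ g, M ≤ (r.length : Int)) :
    ∀ (f : Nat) (x y : Int), 0 ≤ x → x < N → 0 ≤ y → y < M → y.toNat < f →
      pvSlide g N M (0, -1) f x y = (x, (pvS1' (pvRowB g M.toNat x.toNat) y.toNat : Int)) := by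
  intro f
  induction f with
  | zero => intro x y hx0 hxN hy0 hyM hf; omega
  | succ f ih =>
    intro x y hx0 hxN hy0 hyM hf
    have hunf : pvSlide g N M (0, -1) (f + 1) x y =
        if 0 ≤ x + 0 ∧ x + 0 < N ∧ 0 ≤ y + -1 ∧ y + -1 < M ∧ pvGetC g (x + 0) (y + -1) ≠ 'D' then
          pvSlide g N M (0, -1) f (x + 0) (y + -1)
        else (x, y) := rfl
    by_cases hstep : 0 ≤ y - 1 ∧ pvGetC g x (y - 1) ≠ 'D'
    · have hget : (pvRowB g M.toNat x.toNat)[y.toNat - 1]? = some (pvGetC g x (y - 1)) := by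
        have := rowB_get g M x (y - 1) hx0 (by omega) hstep.1 (by omega) Hrow
        rwa [show (y - 1).toNat = y.toNat - 1 from by omega] at this
      rw [hunf, if_pos ⟨by omega, by omega, by omega, by omega, by
        rw [show x + (0 : Int) = x from by ring, show y + (-1 : Int) = y - 1 from by ring]
        exact hstep.2⟩]
      rw [show x + (0 : Int) = x from by ring, show y + (-1 : Int) = y - 1 from by ring]
      rw [ih x (y - 1) hx0 hxN hstep.1 (by omega) (by omega)]
      have hS : pvS1' (pvRowB g M.toNat x.toNat) y.toNat =
          pvS1' (pvRowB g M.toNat x.toNat) (y.toNat - 1) := by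
        rw [pvS1', if_pos ⟨by omega, by rw [hget]; simpa using hstep.2⟩]
      rw [show (y - 1).toNat = y.toNat - 1 from by omega, hS]
    · rw [hunf, if_neg (by
        intro h
        refine hstep ⟨h.2.2.1, ?_⟩
        have := h.2.2.2.2
        rwa [show x + (0 : Int) = x from by ring, show y + (-1 : Int) = y - 1 from by ring] at this)]
      have hS : pvS1' (pvRowB g M.toNat x.toNat) y.toNat = y.toNat := by
        rw [pvS1', if_neg]
        intro h
        have hy1 : 0 ≤ y - 1 := by omega
        have hget : (pvRowB g M.toNat x.toNat)[y.toNat - 1]? = some (pvGetC g x (y - 1)) := by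
          have := rowB_get g M x (y - 1) hx0 (by omega) hy1 (by omega) Hrow
          rwa [show (y - 1).toNat = y.toNat - 1 from by omega] at this
        rw [hget] at h
        exact hstep ⟨hy1, by simpa using h.2⟩
      rw [hS]
      simp [Int.toNat_of_nonneg hy0]

lemma slide_down (g : List (List Char)) (N M : Int) (HgN : N = (g.length : Int)) :
    ∀ (f : Nat) (x y : Int), 0 ≤ x → x < N → 0 ≤ y → y < M → N.toNat - x.toNat ≤ f →
      pvSlide g N M (1, 0) f x y = ((pvS1 (pvColB g N M y) x.toNat : Int), y) := by
  intro f
  induction f with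
  | zero => intro x y hx0 hxN hy0 hyM hf; omega
  | succ f ih =>
    intro x y hx0 hxN hy0 hyM hf
    have hlen : (pvColB g N M y).length = N.toNat := colB_len g N M y
    have hunf : pvSlide g N M (1, 0) (f + 1) x y =
        if 0 ≤ x + 1 ∧ x + 1 < N ∧ 0 ≤ y + 0 ∧ y + 0 < M ∧ pvGetC g (x + 1) (y + 0) ≠ 'D' then
          pvSlide g N M (1, 0) f (x + 1) (y + 0)
        else (x, y) := rfl
    by_cases hstep : x + 1 < N ∧ pvGetC g (x + 1) y ≠ 'D'
    · have hget : (pvColB g N M y)[x.toNat + 1]? = some (pvGetC g (x + 1) y) := by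
        have := colB_get g N M y (x + 1) HgN (by omega) hstep.1 hy0 hyM
        rwa [show (x + 1).toNat = x.toNat + 1 from by omega] at this
      rw [hunf, if_pos ⟨by omega, hstep.1, by omega, by omega, by simpa using hstep.2⟩]
      rw [show y + (0 : Int) = y from by ring]
      rw [ih (x + 1) y (by omega) hstep.1 hy0 hyM (by omega)]
      have hS : pvS1 (pvColB g N M y) x.toNat = pvS1 (pvColB g N M y) (x.toNat + 1) := by
        rw [pvS1, if_pos ⟨by omega, by rw [hget]; simpa using hstep.2⟩]
      rw [show (x + 1).toNat = x.toNat + 1 from by omega, hS]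
    · rw [hunf, if_neg (by
        intro h
        refine hstep ⟨h.2.1, ?_⟩
        have := h.2.2.2.2
        rwa [show y + (0 : Int) = y from by ring] at this)]
      have hS : pvS1 (pvColB g N M y) x.toNat = x.toNat := by
        rw [pvS1, if_neg]
        intro h
        have hx1 : x + 1 < N := by omega
        have hget : (pvColB g N M y)[x.toNat + 1]? = some (pvGetC g (x + 1) y) := by
          have := colB_get g N M y (x + 1) HgN (by omega) hx1 hy0 hyM
          rwa [show (x + 1).toNat = x.toNat + 1 from by omega] at this
        rw [hget] at h
        exact hstep ⟨hx1, by simpa using h.2⟩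
      rw [hS]
      simp [Int.toNat_of_nonneg hx0]

lemma slide_up (g : List (List Char)) (N M : Int) (HgN : N = (g.length : Int)) :
    ∀ (f : Nat) (x y : Int), 0 ≤ x → x < N → 0 ≤ y → y < M → x.toNat < f →
      pvSlide g N M (-1, 0) f x y = ((pvS1' (pvColB g N M y) x.toNat : Int), y) := by
  intro f
  induction f with
  | zero => intro x y hx0 hxN hy0 hyM hf; omega
  | succ f ih =>
    intro x y hx0 hxN hy0 hyM hf
    have hunf : pvSlide g N M (-1, 0) (f + 1) x y =
        if 0 ≤ x + -1 ∧ x + -1 < N ∧ 0 ≤ y + 0 ∧ y + 0 < M ∧ pvGetC g (x + -1) (y + 0) ≠ 'D' then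
          pvSlide g N M (-1, 0) f (x + -1) (y + 0)
        else (x, y) := rfl
    by_cases hstep : 0 ≤ x - 1 ∧ pvGetC g (x - 1) y ≠ 'D'
    · have hget : (pvColB g N M y)[x.toNat - 1]? = some (pvGetC g (x - 1) y) := by
        have := colB_get g N M y (x - 1) HgN hstep.1 (by omega) hy0 hyM
        rwa [show (x - 1).toNat = x.toNat - 1 from by omega] at this
      rw [hunf, if_pos ⟨by omega, by omega, by omega, by omega, by
        rw [show x + (-1 : Int) = x - 1 from by ring, show y + (0 : Int) = y from by ring]
        exact hstep.2⟩]
      rw [show x + (-1 : Int) = x - 1 from by ring, show y + (0 : Int) = y from by ring]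
      rw [ih (x - 1) y hstep.1 (by omega) hy0 hyM (by omega)]
      have hS : pvS1' (pvColB g N M y) x.toNat = pvS1' (pvColB g N M y) (x.toNat - 1) := by
        rw [pvS1', if_pos ⟨by omega, by rw [hget]; simpa using hstep.2⟩]
      rw [show (x - 1).toNat = x.toNat - 1 from by omega, hS]
    · rw [hunf, if_neg (by
        intro h
        refine hstep ⟨h.1, ?_⟩
        have := h.2.2.2.2
        rwa [show x + (-1 : Int) = x - 1 from by ring, show y + (0 : Int) = y from by ring] at this)]
      have hS : pvS1' (pvColB g N M y) x.toNat = x.toNat := by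
        rw [pvS1', if_neg]
        intro h
        have hx1 : 0 ≤ x - 1 := by omega
        have hget : (pvColB g N M y)[x.toNat - 1]? = some (pvGetC g (x - 1) y) := by
          have := colB_get g N M y (x - 1) HgN hx1 (by omega) hy0 hyM
          rwa [show (x - 1).toNat = x.toNat - 1 from by omega] at this
        rw [hget] at h
        exact hstep ⟨hx1, by simpa using h.2⟩
      rw [hS]
      simp [Int.toNat_of_nonneg hx0]

lemma lookup_br (g : List (List Char)) (N M : Int) (HgN : N = (g.length : Int))
    (Hrow : ∀ r ∈ g, M ≤ (r.length : Int)) (x y : Int)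
    (hx0 : 0 ≤ x) (hxN : x < N) (hy0 : 0 ≤ y) (hyM : y < M) :
    pvGetI ((g.map (fun r => r.take M.toNat)).map (pvSweepBwd 0)) x y
      = (pvS1 (pvRowB g M.toNat x.toNat) y.toNat : Int) := by
  unfold pvGetI
  rw [PySem.List.pyGet?_of_nonneg _ hx0, List.getElem?_map, List.getElem?_map]
  have hxlen : x.toNat < g.length := by omega
  rw [List.getElem?_eq_getElem hxlen]
  simp only [Option.map_some, Option.getD_some]
  have hrow : (g[x.toNat]).take M.toNat = pvRowB g M.toNat x.toNat := by
    unfold pvRowB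
    rw [List.getElem?_eq_getElem hxlen]
    simp
  rw [hrow, PySem.List.pyGet?_of_nonneg _ hy0]
  have hlen : (pvRowB g M.toNat x.toNat).length = M.toNat := rowB_len g M x.toNat Hrow hxlen
  rw [sweepBwd_get 0 _ y.toNat (by omega)]
  simp

lemma lookup_fr (g : List (List Char)) (N M : Int) (HgN : N = (g.length : Int))
    (Hrow : ∀ r ∈ g, M ≤ (r.length : Int)) (x y : Int)
    (hx0 : 0 ≤ x) (hxN : x < N) (hy0 : 0 ≤ y) (hyM : y < M) :
    pvGetI ((g.map (fun r => r.take M.toNat)).map pvSweepFwd) x y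
      = (pvS1' (pvRowB g M.toNat x.toNat) y.toNat : Int) := by
  unfold pvGetI
  rw [PySem.List.pyGet?_of_nonneg _ hx0, List.getElem?_map, List.getElem?_map]
  have hxlen : x.toNat < g.length := by omega
  rw [List.getElem?_eq_getElem hxlen]
  simp only [Option.map_some, Option.getD_some]
  have hrow : (g[x.toNat]).take M.toNat = pvRowB g M.toNat x.toNat := by
    unfold pvRowB
    rw [List.getElem?_eq_getElem hxlen]
    simp
  rw [hrow, PySem.List.pyGet?_of_nonneg _ hy0]
  have hlen : (pvRowB g M.toNat x.toNat).length = M.toNat := rowB_len g M x.toNat Hrow hxlen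
  rw [sweepFwd_get _ y.toNat (by omega)]
  simp

lemma lookup_bc (g : List (List Char)) (N M : Int) (HgN : N = (g.length : Int)) (x y : Int)
    (hx0 : 0 ≤ x) (hxN : x < N) (hy0 : 0 ≤ y) (hyM : y < M) :
    pvGetI (((PySem.List.pyRange 0 M 1).map (fun j => pvColB g N M j)).map (pvSweepBwd 0)) y x
      = (pvS1 (pvColB g N M y) x.toNat : Int) := by
  unfold pvGetI
  rw [PySem.List.pyGet?_of_nonneg _ hy0, List.getElem?_map, List.getElem?_map]
  have hy : (PySem.List.pyRange 0 M 1)[y.toNat]? = some y := by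
    rw [PySem.List.getElem?_pyRange_one, if_pos (by omega)]
    simp [Int.toNat_of_nonneg hy0]
  rw [hy]
  simp only [Option.map_some, Option.getD_some]
  rw [PySem.List.pyGet?_of_nonneg _ hx0]
  have hlen : (pvColB g N M y).length = N.toNat := colB_len g N M y
  rw [sweepBwd_get 0 _ x.toNat (by omega)]
  simp

lemma lookup_fc (g : List (List Char)) (N M : Int) (HgN : N = (g.length : Int)) (x y : Int)
    (hx0 : 0 ≤ x) (hxN : x < N) (hy0 : 0 ≤ y) (hyM : y < M) :
    pvGetI (((PySem.List.pyRange 0 M 1).map (fun j => pvColB g N M j)).map pvSweepFwd) y x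
      = (pvS1' (pvColB g N M y) x.toNat : Int) := by
  unfold pvGetI
  rw [PySem.List.pyGet?_of_nonneg _ hy0, List.getElem?_map, List.getElem?_map]
  have hy : (PySem.List.pyRange 0 M 1)[y.toNat]? = some y := by
    rw [PySem.List.getElem?_pyRange_one, if_pos (by omega)]
    simp [Int.toNat_of_nonneg hy0]
  rw [hy]
  simp only [Option.map_some, Option.getD_some]
  rw [PySem.List.pyGet?_of_nonneg _ hx0]
  have hlen : (pvColB g N M y).length = N.toNat := colB_len g N M y
  rw [sweepFwd_get _ x.toNat (by omega)]
  simp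

lemma nbrs_eq (g : List (List Char)) (N M : Int) (HgN : N = (g.length : Int))
    (Hrow : ∀ r ∈ g, M ≤ (r.length : Int)) (x y : Int)
    (hx0 : 0 ≤ x) (hxN : x < N) (hy0 : 0 ≤ y) (hyM : y < M) :
    [(pvGetI (((PySem.List.pyRange 0 M 1).map (fun j => pvColB g N M j)).map (pvSweepBwd 0)) y x, y),
     (pvGetI (((PySem.List.pyRange 0 M 1).map (fun j => pvColB g N M j)).map pvSweepFwd) y x, y),
     (x, pvGetI ((g.map (fun r => r.take M.toNat)).map (pvSweepBwd 0)) x y),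
     (x, pvGetI ((g.map (fun r => r.take M.toNat)).map pvSweepFwd) x y)]
      = pvDirs.map (fun d => pvSlide g N M d ((N + M).toNat + 1) x y) := by
  simp only [pvDirs, List.map_cons, List.map_nil]
  rw [slide_down g N M HgN _ x y hx0 hxN hy0 hyM (by omega)]
  rw [slide_up g N M HgN _ x y hx0 hxN hy0 hyM (by omega)]
  rw [slide_right g N M HgN Hrow _ x y hx0 hxN hy0 hyM (by omega)]
  rw [slide_left g N M HgN Hrow _ x y hx0 hxN hy0 hyM (by omega)]
  rw [lookup_bc g N M HgN x y hx0 hxN hy0 hyM, lookup_fc g N M HgN x y hx0 hxN hy0 hyM]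
  rw [lookup_br g N M HgN Hrow x y hx0 hxN hy0 hyM, lookup_fr g N M HgN Hrow x y hx0 hxN hy0 hyM]

lemma nbrs_range (g : List (List Char)) (N M : Int) (HgN : N = (g.length : Int))
    (Hrow : ∀ r ∈ g, M ≤ (r.length : Int)) (x y : Int)
    (hx0 : 0 ≤ x) (hxN : x < N) (hy0 : 0 ≤ y) (hyM : y < M) :
    ∀ p ∈ pvDirs.map (fun d => pvSlide g N M d ((N + M).toNat + 1) x y),
      0 ≤ p.1 ∧ p.1 < N ∧ 0 ≤ p.2 ∧ p.2 < M := by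
  rw [← nbrs_eq g N M HgN Hrow x y hx0 hxN hy0 hyM]
  have hcol : (pvColB g N M y).length = N.toNat := colB_len g N M y
  have hrow : (pvRowB g M.toNat x.toNat).length = M.toNat :=
    rowB_len g M x.toNat Hrow (by omega)
  intro p hp
  rw [lookup_bc g N M HgN x y hx0 hxN hy0 hyM, lookup_fc g N M HgN x y hx0 hxN hy0 hyM,
    lookup_br g N M HgN Hrow x y hx0 hxN hy0 hyM, lookup_fr g N M HgN Hrow x y hx0 hxN hy0 hyM] at hp
  have h1 : pvS1 (pvColB g N M y) x.toNat < N.toNat := by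
    have := pvS1_lt (pvColB g N M y) x.toNat (by rw [hcol]; omega)
    rwa [hcol] at this
  have h2 : pvS1' (pvColB g N M y) x.toNat ≤ x.toNat := pvS1'_le _ x.toNat
  have h3 : pvS1 (pvRowB g M.toNat x.toNat) y.toNat < M.toNat := by
    have := pvS1_lt (pvRowB g M.toNat x.toNat) y.toNat (by rw [hrow]; omega)
    rwa [hrow] at this
  have h4 : pvS1' (pvRowB g M.toNat x.toNat) y.toNat ≤ y.toNat := pvS1'_le _ y.toNat
  have hN0 : (0 : Int) ≤ N := by omega
  have hM0 : (0 : Int) ≤ M := by omega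
  have h1' : (pvS1 (pvColB g N M y) x.toNat : Int) < N :=
    lt_of_lt_of_le (Nat.cast_lt.mpr h1) (le_of_eq (Int.toNat_of_nonneg hN0))
  have h2' : (pvS1' (pvColB g N M y) x.toNat : Int) ≤ x :=
    le_trans (Nat.cast_le.mpr h2) (le_of_eq (Int.toNat_of_nonneg hx0))
  have h3' : (pvS1 (pvRowB g M.toNat x.toNat) y.toNat : Int) < M :=
    lt_of_lt_of_le (Nat.cast_lt.mpr h3) (le_of_eq (Int.toNat_of_nonneg hM0))
  have h4' : (pvS1' (pvRowB g M.toNat x.toNat) y.toNat : Int) ≤ y :=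
    le_trans (Nat.cast_le.mpr h4) (le_of_eq (Int.toNat_of_nonneg hy0))
  simp only [List.mem_cons, List.not_mem_nil, or_false] at hp
  rcases hp with rfl | rfl | rfl | rfl
  · exact ⟨Int.natCast_nonneg _, h1', hy0, hyM⟩
  · exact ⟨Int.natCast_nonneg _, lt_of_le_of_lt h2' hxN, hy0, hyM⟩
  · exact ⟨hx0, hxN, Int.natCast_nonneg _, h3'⟩
  · exact ⟨hx0, hxN, Int.natCast_nonneg _, lt_of_le_of_lt h4' hyM⟩

lemma relax_append (c : Int) : ∀ (l : List (Int × Int)) (d : List (List Int)) (q0 : List (Int × Int × Int)),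
    l.foldl (pvRelax c) (d, q0) =
      ((l.foldl (pvRelax c) (d, [])).1, q0 ++ (l.foldl (pvRelax c) (d, [])).2) := by
  intro l
  induction l with
  | nil => intro d q0; simp
  | cons p l ih =>
    intro d q0
    simp only [List.foldl_cons]
    by_cases h : pvGetI d p.1 p.2 > c + 1
    · rw [show pvRelax c (d, q0) p = (pvSetI d p.1 p.2 (c + 1), q0 ++ [(p.1, p.2, c + 1)]) from by
        simp [pvRelax, h]]
      rw [show pvRelax c (d, []) p = (pvSetI d p.1 p.2 (c + 1), [(p.1, p.2, c + 1)]) from by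
        simp [pvRelax, h]]
      rw [ih (pvSetI d p.1 p.2 (c + 1)) (q0 ++ [(p.1, p.2, c + 1)]),
        ih (pvSetI d p.1 p.2 (c + 1)) [(p.1, p.2, c + 1)]]
      simp
    · rw [show pvRelax c (d, q0) p = (d, q0) from by simp [pvRelax, h],
        show pvRelax c (d, []) p = (d, []) from by simp [pvRelax, h]]
      exact ih d q0

lemma relax_mem (c : Int) : ∀ (l : List (Int × Int)) (d : List (List Int)) (t : Int × Int × Int),
    t ∈ (l.foldl (pvRelax c) (d, [])).2 → ∃ p ∈ l, t = (p.1, p.2, c + 1) := by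
  intro l
  induction l with
  | nil => intro d t ht; simp at ht
  | cons p l ih =>
    intro d t ht
    simp only [List.foldl_cons] at ht
    by_cases h : pvGetI d p.1 p.2 > c + 1
    · rw [show pvRelax c (d, []) p = (pvSetI d p.1 p.2 (c + 1), [(p.1, p.2, c + 1)]) from by
        simp [pvRelax, h]] at ht
      rw [relax_append c l _ [(p.1, p.2, c + 1)]] at ht
      simp only [List.mem_append, List.mem_singleton] at ht
      rcases ht with ht | ht
      · exact ⟨p, by simp, ht⟩
      · obtain ⟨p', hp', hte⟩ := ih _ t ht
        exact ⟨p', by simp [hp'], hte⟩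
    · rw [show pvRelax c (d, []) p = (d, []) from by simp [pvRelax, h]] at ht
      obtain ⟨p', hp', hte⟩ := ih _ t ht
      exact ⟨p', by simp [hp'], hte⟩

lemma init_congr (g : List (List Char)) (N M : Int) (HgN : N = (g.length : Int)) :
    pvInit (g.map (fun r => r.take M.toNat)) N M = pvInit g N M := by
  unfold pvInit
  refine PySem.List.foldl_congr_mem _ _ _ _ ?_
  intro st i hi
  refine PySem.List.foldl_congr_mem _ _ _ _ ?_
  intro st' j hj
  rw [PySem.List.mem_pyRange_one] at hi hj
  rw [getC_take g M i j hi.1 (by omega) hj.1 hj.2]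

lemma init_range (g : List (List Char)) (N M : Int) (HN : 0 < N) (HM : 0 < M) :
    0 ≤ (pvInit g N M).1 ∧ (pvInit g N M).1 < N ∧
      0 ≤ (pvInit g N M).2.1 ∧ (pvInit g N M).2.1 < M := by
  unfold pvInit
  refine List.foldlRecOn (motive := fun st : Int × Int × List (List Int) =>
    0 ≤ st.1 ∧ st.1 < N ∧ 0 ≤ st.2.1 ∧ st.2.1 < M) _ _ ?_ ?_
  · exact ⟨le_refl 0, HN, le_refl 0, HM⟩
  · intro st hst i hi
    refine List.foldlRecOn (motive := fun st : Int × Int × List (List Int) =>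
      0 ≤ st.1 ∧ st.1 < N ∧ 0 ≤ st.2.1 ∧ st.2.1 < M) _ _ hst ?_
    intro st' hst' j hj
    rw [PySem.List.mem_pyRange_one] at hi hj
    by_cases hR : pvGetC g i j = 'R'
    · rw [if_pos hR]
      exact ⟨hi.1, hi.2, hj.1, hj.2⟩
    · simp only [if_neg hR]
      exact hst'

lemma pvLock (g : List (List Char)) (N M : Int)
    (HgN : N = (g.length : Int))
    (Hrow : ∀ r ∈ g, M ≤ (r.length : Int)) :
    ∀ (f : Nat) (q : List (Int × Int × Int)) (head : Nat) (dis : List (List Int)),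
      head ≤ q.length →
      (∀ t ∈ q.drop head, 0 ≤ t.1 ∧ t.1 < N ∧ 0 ≤ t.2.1 ∧ t.2.1 < M) →
      pvLoopA g N M f (q.drop head) dis =
        pvLoopB (g.map (fun r => r.take M.toNat))
          (((PySem.List.pyRange 0 M 1).map (fun j => pvColB g N M j)).map (pvSweepBwd 0))
          (((PySem.List.pyRange 0 M 1).map (fun j => pvColB g N M j)).map pvSweepFwd)
          ((g.map (fun r => r.take M.toNat)).map (pvSweepBwd 0))
          ((g.map (fun r => r.take M.toNat)).map pvSweepFwd)
          f q head dis := by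
  intro f
  induction f with
  | zero => intro q head dis _ _; rfl
  | succ f ih =>
    intro q head dis hhead hinv
    cases hd : q.drop head with
    | nil =>
      have hlen : q.length ≤ head := by
        have := congrArg List.length hd
        simp only [List.length_drop, List.length_nil] at this
        omega
      have hget : PySem.List.pyGet? q ((head : Nat) : Int) = none := by
        rw [PySem.List.pyGet?_natCast]
        exact List.getElem?_eq_none hlen
      simp only [pvLoopA, pvLoopB, hget]
    | cons t rest =>
      obtain ⟨x, y, c⟩ := t
      have hhead' : head < q.length := by
        by_contra hcon
        have : q.drop head = [] := List.drop_eq_nil_of_le (by omega)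
        rw [this] at hd
        exact absurd hd (by simp)
      have hget : PySem.List.pyGet? q ((head : Nat) : Int) = some (x, y, c) := by
        rw [PySem.List.pyGet?_natCast]
        have h0 : (q.drop head)[0]? = q[head + 0]? := List.getElem?_drop
        rw [hd] at h0
        simpa using h0.symm
      have hrest : rest = q.drop (head + 1) := by
        have : (q.drop head).tail = q.drop (head + 1) := by
          rw [← List.drop_drop]
          simp
        rw [hd] at this
        simpa using this
      have htb := hinv (x, y, c) (by rw [hd]; simp)

      obtain ⟨hx0, hxN, hy0, hyM⟩ := htb
      have hGeq : pvGetC (g.map (fun r => r.take M.toNat)) x y = pvGetC g x y :=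
        getC_take g M x y hx0 (by omega) hy0 hyM
      simp only [pvLoopA, pvLoopB, hget, hGeq]
      by_cases hG : pvGetC g x y = 'G'
      · simp [hG]
      · simp only [if_neg hG]
        rw [← List.foldl_map (f := fun d => pvSlide g N M d ((N + M).toNat + 1) x y) (g := pvRelax c)]
        rw [nbrs_eq g N M HgN Hrow x y hx0 hxN hy0 hyM]
        set L := pvDirs.map (fun d => pvSlide g N M d ((N + M).toNat + 1) x y) with hL
        rw [relax_append c L dis rest, relax_append c L dis q]
        set X := L.foldl (pvRelax c) (dis, []) with hX
        have hdrop : (q ++ X.2).drop (head + 1) = rest ++ X.2 := by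
          rw [List.drop_append_of_le_length (by omega), ← hrest]
        have hinv' : ∀ t ∈ (q ++ X.2).drop (head + 1),
            0 ≤ t.1 ∧ t.1 < N ∧ 0 ≤ t.2.1 ∧ t.2.1 < M := by
          rw [hdrop]
          intro t ht
          rcases List.mem_append.mp ht with ht | ht
          · exact hinv t (by rw [hd]; simp [ht])
          · obtain ⟨p, hp, rfl⟩ := relax_mem c L dis t ht
            have := nbrs_range g N M HgN Hrow x y hx0 hxN hy0 hyM p hp
            exact ⟨this.1, this.2.1, this.2.2.1, this.2.2.2⟩
        have := ih (q ++ X.2) (head + 1) X.1 (by simp; omega) hinv'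
        rw [hdrop] at this
        exact this

-- ===== VERDICT (by name: the statement is the Claim_ definition above) =====
theorem solution_spec : Claim_equal_solution := by
  intro board _ hpre
  unfold Spec_solution
  obtain ⟨hne, hM0, hrows⟩ := hpre
  cases board with
  | nil => exact absurd rfl hne
  | cons b0 bs =>
    simp only [List.headD_cons] at hM0 hrows
    simp only [solution, solution_alt]
    set g : List (List Char) := (b0 :: bs).map (fun s : String => s.toList) with hg
    have hpy0 : PySem.List.pyGet? g 0 = some b0.toList := by
      rw [hg]
      simp only [List.map_cons]
      exact PySem.List.pyGet?_zero_cons _ _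
    rw [hpy0]
    simp only [Option.getD_some]
    set N : Int := (g.length : Int) with hN
    set M : Int := (b0.toList.length : Int) with hM
    have HN : 0 < N := by rw [hN, hg]; simp
    have HM : 0 < M := by rw [hM]; exact_mod_cast hM0
    have HgN : N = (g.length : Int) := hN
    have Hrow : ∀ r ∈ g, M ≤ (r.length : Int) := by
      intro r hr
      rw [hg] at hr
      obtain ⟨s, hs, rfl⟩ := List.mem_map.mp hr
      rw [hM]
      exact_mod_cast hrows s hs
    have hic := init_congr g N M HgN
    rw [hic]
    have hir := init_range g N M HN HM
    have := pvLock g N M HgN Hrow (100 * (N.toNat * M.toNat) + 1)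
      [((pvInit g N M).1, (pvInit g N M).2.1, 0)] 0 (pvInit g N M).2.2
      (by simp) (by
        intro t ht
        simp only [List.drop_zero, List.mem_singleton] at ht
        subst ht
        exact ⟨hir.1, hir.2.1, hir.2.2.1, hir.2.2.2⟩)
    simp only [List.drop_zero] at this
    rw [this]
    simp only [pvColB]
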